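-- pv_equiv track=rewrite | github.com/dleemiller/CnakeCharmer | cnake_data/unpaired/layered_image_decode.py | decode_layered_image
-- ===== SOURCE A (Python) =====
-- def decode_layered_image(digits, width=25, height=6):
--     """Decode layered image stream using 0/1/2 transparency composition."""
--     layer_size = width * height
--     picture = [0 for _ in range(layer_size)]
--
--     for i, ch in enumerate(digits):
--         cur = i % layer_size
--         if i < layer_size or picture[cur] == 2:
--             picture[cur] = int(ch)
--
--     return "".join(str(x) for x in picture)
-- ===== SOURCE B (Python) =====
-- def decode_layered_image(digits, width=25, height=6):
--     """Decode layered image stream using 0/1/2 transparency composition."""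
--     layer_size = width * height
--     n = len(digits)
--     out = []
--     for p in range(layer_size):
--         v = 0 if p >= n else 2
--         for q in range(p, n, layer_size):
--             d = int(digits[q])
--             if d != 2:
--                 v = d
--                 break
--         out.append(str(v))
--     return "".join(out)
-- ===== Notes on version B (the rewrite author's own statement) =====
-- stated objective: alternative
-- what changed: B replaces A's row-major fold over a mutable picture buffer (conditionally overwriting transparent pixels layer by layer) with a per-pixel column scan that walks the layers at each position and stops at the first non-transparent digit.
import Mathlib
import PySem

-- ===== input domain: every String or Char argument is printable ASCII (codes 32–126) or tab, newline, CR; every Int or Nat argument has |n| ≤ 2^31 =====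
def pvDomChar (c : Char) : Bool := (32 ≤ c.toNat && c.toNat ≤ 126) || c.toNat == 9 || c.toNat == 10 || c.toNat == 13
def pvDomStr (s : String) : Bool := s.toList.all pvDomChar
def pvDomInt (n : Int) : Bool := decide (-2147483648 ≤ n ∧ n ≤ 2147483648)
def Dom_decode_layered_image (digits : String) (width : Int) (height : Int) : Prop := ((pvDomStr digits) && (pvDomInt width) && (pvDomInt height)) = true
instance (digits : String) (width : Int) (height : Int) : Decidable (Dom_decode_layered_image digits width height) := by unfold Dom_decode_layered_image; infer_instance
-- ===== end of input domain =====

-- B differs from A by decomposition: A folds row-major over a mutable picture buffer; B scans each pixel's layer column, stopping at the first non-2 digit.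

-- int(ch) for a one-character string (used by both ports; Pre_ guarantees it succeeds in Python)
def pvDigitVal (c : Char) : Int := (PySem.Int.ofChars? [c]).getD 0

-- ===== PORT A =====
def decode_layered_image (digits : String) (width : Int) (height : Int) : String :=
  let L := width * height
  let picture : List Int := (PySem.List.pyRange 0 L 1).map (fun _ => 0)
  let pic := (PySem.List.enumerate digits.toList 0).foldl
    (fun pic iv =>
      let cur := PySem.Int.mod iv.1 L
      if iv.1 < L ∨ PySem.List.pyGetD pic cur 0 = 2
      then PySem.List.pySetD pic cur (pvDigitVal iv.2)
      else pic) picture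
  PySem.Str.join "" (pic.map (fun x => PySem.Int.toStr x))

-- ===== PORT B =====
-- the inner 'for q in range(p, n, layer_size): … break' loop of Source B
def pvColScan (cs : List Char) (v : Int) : List Int → Int
  | [] => v
  | q :: rest =>
    let d := pvDigitVal (PySem.List.pyGetD cs q '0')
    if d ≠ 2 then d else pvColScan cs v rest

def decode_layered_image_alt (digits : String) (width : Int) (height : Int) : String :=
  let L := width * height
  let cs := digits.toList
  let n : Int := (cs.length : Int)
  PySem.Str.join "" ((PySem.List.pyRange 0 L 1).map (fun p =>
    PySem.Int.toStr (pvColScan cs (if n ≤ p then 0 else 2) (PySem.List.pyRange p n L))))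

-- ===== PRECONDITION & SPEC =====
-- Pre_ = exactly where Python A returns: every character must be a decimal digit (int(ch) raises
-- ValueError otherwise), and for nonempty digits the layer size must be positive (i % 0 raises
-- ZeroDivisionError; a negative layer size gives an empty picture and an IndexError).
def pvIsDigitChar (c : Char) : Bool := 48 ≤ c.toNat && c.toNat ≤ 57

def Pre_decode_layered_image (digits : String) (width : Int) (height : Int) : Prop :=
  (digits.toList.all pvIsDigitChar = true) ∧ (digits = "" ∨ 0 < width * height)
instance (digits : String) (width : Int) (height : Int) : Decidable (Pre_decode_layered_image digits width height) := by unfold Pre_decode_layered_image; infer_instance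

def pvWitness_decode_layered_image : String × Int × Int := ("21", 1, 1)

def Spec_decode_layered_image (digits : String) (width : Int) (height : Int) (out : String) : Prop := out = decode_layered_image_alt digits width height
instance (digits : String) (width : Int) (height : Int) (out : String) : Decidable (Spec_decode_layered_image digits width height out) := by unfold Spec_decode_layered_image; infer_instance

-- ===== CLAIM (what is proved, stated in full; the proofs are below) =====
def Claim_equal_decode_layered_image : Prop := ∀ (digits : String) (width : Int) (height : Int), Dom_decode_layered_image digits width height → Pre_decode_layered_image digits width height → Spec_decode_layered_image digits width height (decode_layered_image digits width height)

-- ===== LEMMAS AND PROOFS =====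

-- value of pixel p after the first b entries of the stream have been composited (b = length at the end: exactly B's per-pixel expression)
def pvColv (cs : List Char) (L b p : Int) : Int :=
  pvColScan cs (if b ≤ p then 0 else 2) (PySem.List.pyRange p b L)

lemma pyRange_pos_nil (L p b : Int) (hL : 0 < L) (h : b ≤ p) :
    PySem.List.pyRange p b L = [] := by
  rw [PySem.List.pyRange_of_pos _ _ hL, if_neg (by omega)]
  simp

lemma pyRange_pos_snoc (L p j : Int) (hL : 0 < L) (k : Int) (hk : 0 ≤ k)
    (hj : j = p + L * k) :
    PySem.List.pyRange p (j + 1) L = PySem.List.pyRange p j L ++ [j] := by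
  rw [PySem.List.pyRange_of_pos _ _ hL, PySem.List.pyRange_of_pos _ _ hL]
  have h1 : p < j + 1 := by nlinarith
  rw [if_pos h1]
  have hc1 : ((j + 1 - p + L - 1) / L) = k + 1 := by
    have : j + 1 - p + L - 1 = L * (k + 1) := by ring_nf; omega
    rw [this, Int.mul_ediv_cancel_left _ (by omega)]
  by_cases hpj : p < j
  · rw [if_pos hpj]
    have hc0 : ((j - p + L - 1) / L) = k := by
      have : j - p + L - 1 = (L - 1) + L * k := by omega
      rw [this, Int.add_mul_ediv_left _ _ (show L ≠ 0 by omega)]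
      rw [Int.ediv_eq_zero_of_lt (by omega) (by omega)]
      ring
    rw [hc1, hc0]
    have hkt : (k + 1).toNat = k.toNat + 1 := by omega
    rw [hkt, List.range_succ, List.map_append]
    simp only [List.map_cons, List.map_nil]
    congr 2
    have : (L * ↑k.toNat : Int) = L * k := by
      congr 1; omega
    omega
  · have hpj' : p = j := by omega
    have hk0 : k = 0 := by nlinarith
    rw [if_neg hpj]
    subst hk0
    rw [hc1]
    simp [List.range_succ]
    omega

lemma pyRange_pos_stable (L p j : Int) (hL : 0 < L) (hp : 0 ≤ p) (hpL : p < L) (hj : 0 ≤ j)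
    (hne : p ≠ PySem.Int.mod j L) :
    PySem.List.pyRange p (j + 1) L = PySem.List.pyRange p j L := by
  rw [PySem.Int.mod_eq_emod_of_pos hL] at hne
  set q := j / L with hq
  set r := j % L with hr
  have hqr : L * q + r = j := Int.mul_ediv_add_emod j L
  have hr0 : 0 ≤ r := Int.emod_nonneg j (by omega)
  have hrL : r < L := Int.emod_lt_of_pos j hL
  have hLq1 : L * (q + 1) = L * q + L := by ring
  rw [PySem.List.pyRange_of_pos _ _ hL, PySem.List.pyRange_of_pos _ _ hL]
  by_cases hpj : p < j
  · rw [if_pos (by omega), if_pos hpj]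
    congr 2
    by_cases hcase : p < r
    · have e1 : j + 1 - p + L - 1 = (r - p) + L * (q + 1) := by omega
      have e0 : j - p + L - 1 = (r - p - 1) + L * (q + 1) := by omega
      rw [e1, e0, Int.add_mul_ediv_left _ _ (show L ≠ 0 by omega),
        Int.add_mul_ediv_left _ _ (show L ≠ 0 by omega),
        Int.ediv_eq_zero_of_lt (by omega) (by omega),
        Int.ediv_eq_zero_of_lt (by omega) (by omega)]
    · have hrp : r < p := by omega
      have e1 : j + 1 - p + L - 1 = (L + r - p) + L * q := by omega
      have e0 : j - p + L - 1 = (L + r - p - 1) + L * q := by omega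
      rw [e1, e0, Int.add_mul_ediv_left _ _ (show L ≠ 0 by omega),
        Int.add_mul_ediv_left _ _ (show L ≠ 0 by omega),
        Int.ediv_eq_zero_of_lt (by omega) (by omega),
        Int.ediv_eq_zero_of_lt (by omega) (by omega)]
  · -- j ≤ p: then p ≠ j (else j % L = j = p), so j < p and both ranges are empty
    have : p ≠ j := by
      intro h
      have hq0 : q = 0 := Int.ediv_eq_zero_of_lt hj (by omega)
      have hz : L * q = 0 := by rw [hq0]; ring
      omega
    rw [if_neg (by omega), if_neg hpj]

lemma pvColScan_single (cs : List Char) (q : Int) :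
    pvColScan cs 2 [q] = pvDigitVal (PySem.List.pyGetD cs q '0') := by
  simp only [pvColScan]
  split_ifs with h
  · rfl
  · omega

lemma pvColScan_two_snoc (cs : List Char) (qs : List Int) (q : Int) :
    pvColScan cs 2 (qs ++ [q]) =
      if pvColScan cs 2 qs = 2 then pvColScan cs 2 [q] else pvColScan cs 2 qs := by
  induction qs with
  | nil => simp [pvColScan]
  | cons q0 rest ih =>
    simp only [List.cons_append, pvColScan]
    split_ifs with h h2 h3 <;> simp_all [pvColScan_single]

lemma set_map_pyRange {α : Type} (g : Int → α) (L i : Int) (hi0 : 0 ≤ i) (v : α) :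
    ((PySem.List.pyRange 0 L 1).map g).set i.toNat v
      = (PySem.List.pyRange 0 L 1).map (fun p => if p = i then v else g p) := by
  apply List.ext_getElem
  · simp
  · intro k h1 h2
    rw [List.getElem_set, List.getElem_map, List.getElem_map,
      PySem.List.getElem_pyRange_one]
    split_ifs with ha hb hb
    · rfl
    · exfalso; apply hb; omega
    · exfalso; apply ha; omega
    · rfl

lemma pvColv_succ (cs : List Char) (L : Int) (hL : 0 < L) (j : Nat)
    (p : Int) (hp0 : 0 ≤ p) (hpL : p < L) :
    pvColv cs L ((j : Int) + 1) p =
      if p = PySem.Int.mod (j : Int) L then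
        (if (j : Int) < L ∨ pvColv cs L (j : Int) p = 2
         then pvDigitVal (PySem.List.pyGetD cs (j : Int) '0')
         else pvColv cs L (j : Int) p)
      else pvColv cs L (j : Int) p := by
  have hj0 : (0:Int) ≤ (j:Int) := Int.natCast_nonneg j
  by_cases hpr : p = PySem.Int.mod (j : Int) L
  · rw [if_pos hpr]
    have hk0 : 0 ≤ (j:Int) / L := Int.ediv_nonneg hj0 (le_of_lt hL)
    have hfl : PySem.Int.floordiv (j:Int) L * L + PySem.Int.mod (j:Int) L = (j:Int) :=
      PySem.Int.floordiv_mul_add_mod _ _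
    rw [PySem.Int.floordiv_eq_ediv_of_pos hL] at hfl
    have hcomm : (j:Int) / L * L = L * ((j:Int) / L) := mul_comm _ _
    have hjpk : (j:Int) = p + L * ((j:Int) / L) := by omega
    have hkLnn : 0 ≤ L * ((j:Int) / L) := mul_nonneg (le_of_lt hL) hk0
    have hpj : p ≤ (j:Int) := by omega
    unfold pvColv
    rw [pyRange_pos_snoc L p (j:Int) hL _ hk0 hjpk]
    rw [if_neg (by omega)]
    by_cases hjL : (j:Int) < L
    · -- first layer: the column below j is empty and p = j
      have hpj' : p = (j:Int) := by
        have : PySem.Int.mod (j:Int) L = (j:Int) % L := PySem.Int.mod_eq_emod_of_pos hL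
        have : (j:Int) % L = (j:Int) := Int.emod_eq_of_lt hj0 hjL
        omega
      rw [hpj', pyRange_pos_nil L (j:Int) (j:Int) hL le_rfl]
      rw [List.nil_append, pvColScan_single]
      rw [if_pos (Or.inl hjL)]
    · -- later layer: p < j, the column is nonempty, the default is 2 on both sides
      have hplt : p < (j:Int) := by
        rcases lt_or_eq_of_le hpj with h | h
        · exact h
        · exfalso; omega
      rw [pvColScan_two_snoc, pvColScan_single]
      have hvj : (if (j:Int) ≤ p then (0:Int) else 2) = 2 := if_neg (by omega)
      rw [hvj]
      by_cases hst : pvColScan cs 2 (PySem.List.pyRange p (j:Int) L) = 2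
      · rw [if_pos hst, if_pos (Or.inr hst)]
      · rw [if_neg hst, if_neg (by rintro (h | h); exact hjL h; exact hst h)]
  · rw [if_neg hpr]
    unfold pvColv
    rw [pyRange_pos_stable L p (j:Int) hL hp0 hpL hj0 hpr]
    have hpjne : p ≠ (j:Int) := by
      intro h
      apply hpr
      have h1 : PySem.Int.mod (j:Int) L = (j:Int) % L := PySem.Int.mod_eq_emod_of_pos hL
      have h2 : (j:Int) % L = (j:Int) := Int.emod_eq_of_lt hj0 (by omega)
      omega
    congr 1
    split_ifs with h1 h2 h2 <;> first | rfl | omega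

-- one iteration of A's loop, on a picture that already holds the column values up to layer entry j
lemma decode_step (cs : List Char) (L : Int) (hL : 0 < L) (j : Nat) (hjlt : j < cs.length) :
    (if (j:Int) < L ∨ PySem.List.pyGetD
          ((PySem.List.pyRange 0 L 1).map (fun p => pvColv cs L (j:Int) p)) (PySem.Int.mod (j:Int) L) 0 = 2
     then PySem.List.pySetD ((PySem.List.pyRange 0 L 1).map (fun p => pvColv cs L (j:Int) p))
            (PySem.Int.mod (j:Int) L) (pvDigitVal cs[j])
     else (PySem.List.pyRange 0 L 1).map (fun p => pvColv cs L (j:Int) p))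
    = (PySem.List.pyRange 0 L 1).map (fun p => pvColv cs L ((j:Int) + 1) p) := by
  have hcur0 : 0 ≤ PySem.Int.mod (j:Int) L := PySem.Int.mod_nonneg _ hL
  have hcurL : PySem.Int.mod (j:Int) L < L := PySem.Int.mod_lt _ hL
  have hgd : PySem.List.pyGetD cs (j:Int) '0' = cs[j] := by
    rw [PySem.List.pyGetD_natCast]
    exact List.getD_eq_getElem cs '0' hjlt
  rw [PySem.List.pyGetD_map_pyRange_of_nonneg _ L _ 0 hcur0 hcurL]
  by_cases hcond : (j:Int) < L ∨ pvColv cs L (j:Int) (PySem.Int.mod (j:Int) L) = 2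
  · rw [if_pos hcond, PySem.List.pySetD_of_nonneg _ _ hcur0,
      set_map_pyRange _ L _ hcur0]
    apply List.map_congr_left
    intro p hp
    rw [PySem.List.mem_pyRange_one] at hp
    rw [pvColv_succ cs L hL j p hp.1 hp.2]
    by_cases hpc : p = PySem.Int.mod (j:Int) L
    · rw [if_pos hpc, if_pos hpc, if_pos (by rw [hpc]; exact hcond), hgd]
    · rw [if_neg hpc, if_neg hpc]
  · rw [if_neg hcond]
    symm
    apply List.map_congr_left
    intro p hp
    rw [PySem.List.mem_pyRange_one] at hp
    rw [pvColv_succ cs L hL j p hp.1 hp.2]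
    by_cases hpc : p = PySem.Int.mod (j:Int) L
    · rw [if_pos hpc, if_neg (by rw [← hpc] at hcond; exact hcond)]
    · rw [if_neg hpc]

lemma decode_inv (cs : List Char) (L : Int) (hL : 0 < L) (j : Nat) (hj : j ≤ cs.length) :
    (PySem.List.enumerate (cs.take j) 0).foldl
      (fun pic iv =>
        let cur := PySem.Int.mod iv.1 L
        if iv.1 < L ∨ PySem.List.pyGetD pic cur 0 = 2
        then PySem.List.pySetD pic cur (pvDigitVal iv.2)
        else pic)
      ((PySem.List.pyRange 0 L 1).map (fun _ => (0 : Int)))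
    = (PySem.List.pyRange 0 L 1).map (fun p => pvColv cs L (j : Int) p) := by
  induction j with
  | zero =>
    simp only [List.take_zero, PySem.List.enumerate_nil, List.foldl_nil, Nat.cast_zero]
    apply List.map_congr_left
    intro p hp
    rw [PySem.List.mem_pyRange_one] at hp
    unfold pvColv
    rw [pyRange_pos_nil L p 0 hL hp.1, if_pos hp.1]
    rfl
  | succ j ih =>
    have hjlt : j < cs.length := hj
    rw [List.take_add_one, List.getElem?_eq_getElem hjlt, Option.toList_some,
      PySem.List.enumerate_append, List.foldl_append]
    rw [ih (le_of_lt hjlt)]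
    have hlen : (cs.take j).length = j := List.length_take_of_le (le_of_lt hjlt)
    rw [hlen]
    simp only [PySem.List.enumerate_cons, PySem.List.enumerate_nil, List.foldl_cons,
      List.foldl_nil, zero_add]
    have := decode_step cs L hL j hjlt
    push_cast
    exact this

-- ===== VERDICT (by name: the statement is the Claim_ definition above) =====
theorem decode_layered_image_spec : Claim_equal_decode_layered_image := by
  intro digits width height _hdom hpre
  unfold Spec_decode_layered_image
  by_cases hL : 0 < width * height
  · have hinv := decode_inv digits.toList (width * height) hL digits.toList.length le_rfl
    rw [List.take_length] at hinv
    simp only [decode_layered_image, decode_layered_image_alt]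
    rw [hinv, List.map_map]
    rfl
  · rcases hpre with ⟨_, hemp | hpos⟩
    · subst hemp
      simp [decode_layered_image, decode_layered_image_alt,
        PySem.List.pyRange_one_eq_nil (show (width * height : Int) ≤ 0 by omega)]
    · exact absurd hpos hL
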